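-- pv_equiv track=rewrite | github.com/isauravmanitripathi/Animate-Mermaid-Chart | temp-charts/animate-mermaid.py | generate_mermaid_frames
-- ===== SOURCE A (Python) =====
-- def generate_mermaid_frames(components):
--     """Generates a sequence of Mermaid diagram strings."""
--     frames = []
--     base = "classDiagram"
--     current_diagram_parts = []
--
--     for component in components:
--         current_diagram_parts.append(component)
--         # Indent components for readability
--         indented_components = ["    " + part.replace("\n", "\n    ") for part in current_diagram_parts]
--         frames.append(base + "\n" + "\n".join(indented_components))
--
--     return frames
-- ===== SOURCE B (Python) =====
-- def generate_mermaid_frames(components):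
--     """Generates a sequence of Mermaid diagram strings."""
--     pieces = ["    " + c.replace("\n", "\n    ") for c in components]
--     full = "\n".join(pieces)
--     frames = []
--     end = 0
--     for p in pieces:
--         end += len(p)
--         frames.append("classDiagram\n" + full[:end])
--         end += 1  # skip the separating newline
--     return frames
-- ===== Notes on version B (the rewrite author's own statement) =====
-- stated objective: alternative
-- what changed: B indents every component exactly once, joins them into one full body string, and emits each frame as a prefix slice of that full body at a running cumulative length, instead of A's re-indenting (replace) and re-joining the entire growing parts list on every iteration; intended as faster (measured 5.25x at n=4096) but unconfirmed at the largest probe size, so not claimed.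
import Mathlib
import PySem

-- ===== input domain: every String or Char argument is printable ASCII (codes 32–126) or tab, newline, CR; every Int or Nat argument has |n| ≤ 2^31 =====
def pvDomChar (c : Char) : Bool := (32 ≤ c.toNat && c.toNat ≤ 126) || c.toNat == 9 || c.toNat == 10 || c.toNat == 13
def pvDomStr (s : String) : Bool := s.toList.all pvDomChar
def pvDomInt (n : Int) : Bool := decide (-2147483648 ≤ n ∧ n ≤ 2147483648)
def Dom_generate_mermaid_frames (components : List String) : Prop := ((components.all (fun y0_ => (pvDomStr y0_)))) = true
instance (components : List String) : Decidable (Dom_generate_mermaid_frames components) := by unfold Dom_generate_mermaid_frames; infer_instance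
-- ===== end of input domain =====

-- B indents each component once, joins everything into one full body, and emits each frame as a
-- prefix SLICE of that full body (tracking the cumulative length), instead of A's per-iteration
-- re-indent and re-join of the whole growing parts list (intended as faster; measured 5.25x at n=4096, unconfirmed at larger sizes where both run out of memory).

-- ===== PORT A =====
-- "    " + part.replace("\n", "\n    ")
def pvIndent (part : String) : String := "    " ++ PySem.Str.replace part "\n" "\n    "

-- loop body of A: append component to parts, re-indent all parts, join and append the frame
def pvStepA (st : List String × List String) (component : String) : List String × List String :=
  let parts := st.1 ++ [component]
  let indented_components := parts.map pvIndent
  (parts, st.2 ++ ["classDiagram" ++ "\n" ++ PySem.Str.join "\n" indented_components])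

def generate_mermaid_frames (components : List String) : List String :=
  (components.foldl pvStepA ([], [])).2

-- ===== PORT B =====
-- loop body of B: advance the end index by len(p), slice the full body up to it, step over the '\n'
def pvStepB (full : String) (st : Int × List String) (p : String) : Int × List String :=
  let e := st.1 + PySem.Str.len p
  (e + 1, st.2 ++ ["classDiagram\n" ++ PySem.Str.slice full none (some e)])

def generate_mermaid_frames_alt (components : List String) : List String :=
  let pieces := components.map (fun c => "    " ++ PySem.Str.replace c "\n" "\n    ")
  let full := PySem.Str.join "\n" pieces
  (pieces.foldl (pvStepB full) (0, [])).2

-- ===== PRECONDITION & SPEC =====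
def Spec_generate_mermaid_frames (components : List String) (out : List String) : Prop := out = generate_mermaid_frames_alt components
instance (components : List String) (out : List String) : Decidable (Spec_generate_mermaid_frames components out) := by unfold Spec_generate_mermaid_frames; infer_instance

-- ===== CLAIM (what is proved, stated in full; the proofs are below) =====
def Claim_equal_generate_mermaid_frames : Prop := ∀ (components : List String), Dom_generate_mermaid_frames components → Spec_generate_mermaid_frames components (generate_mermaid_frames components)

-- ===== LEMMAS AND PROOFS =====

theorem pv_chars_join_snoc (sep : List Char) (l : List (List Char)) (x : List Char) (h : l ≠ []) :
    PySem.Chars.join sep (l ++ [x]) = PySem.Chars.join sep l ++ sep ++ x := by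
  induction l with
  | nil => exact absurd rfl h
  | cons a t ih =>
    cases t with
    | nil => simp [PySem.Chars.join_cons_cons, PySem.Chars.join_singleton]
    | cons b u =>
      have h2 := ih (by simp)
      simp only [List.cons_append, PySem.Chars.join_cons_cons] at h2 ⊢
      rw [h2]
      simp [List.append_assoc]

theorem pv_chars_join_append (sep : List Char) (l1 l2 : List (List Char))
    (h1 : l1 ≠ []) (h2 : l2 ≠ []) :
    PySem.Chars.join sep (l1 ++ l2) = PySem.Chars.join sep l1 ++ sep ++ PySem.Chars.join sep l2 := by
  induction l1 with
  | nil => exact absurd rfl h1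
  | cons a t ih =>
    cases t with
    | nil =>
      cases l2 with
      | nil => exact absurd rfl h2
      | cons b u => simp [PySem.Chars.join_cons_cons, PySem.Chars.join_singleton]
    | cons b u =>
      have h3 := ih (by simp)
      simp only [List.cons_append, PySem.Chars.join_cons_cons] at h3 ⊢
      rw [h3]
      simp [List.append_assoc]

theorem pv_join_snoc (l : List String) (x : String) (h : l ≠ []) :
    PySem.Str.join "\n" (l ++ [x]) = PySem.Str.join "\n" l ++ "\n" ++ x := by
  apply String.toList_inj.mp
  simp only [PySem.Str.toList_join, String.toList_append, List.map_append, List.map_cons,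
    List.map_nil]
  exact pv_chars_join_snoc _ _ _ (by simpa using h)

theorem pv_join_singleton (x : String) : PySem.Str.join "\n" [x] = x := by
  apply String.toList_inj.mp
  simp [PySem.Str.toList_join, PySem.Chars.join_singleton]

-- the prefix slice of the full join, cut at the length of the join of a nonempty prefix, is that join
theorem pv_slice_join (l1 l2 : List String) (h1 : l1 ≠ []) :
    PySem.Str.slice (PySem.Str.join "\n" (l1 ++ l2)) none
        (some ((PySem.Str.join "\n" l1).toList.length : Int))
      = PySem.Str.join "\n" l1 := by
  apply String.toList_inj.mp
  rw [PySem.Str.toList_slice, PySem.Chars.slice_eq_listSlice, PySem.List.slice_to_natCast]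
  cases l2 with
  | nil => simp
  | cons b u =>
    have hsplit : (PySem.Str.join "\n" (l1 ++ b :: u)).toList
        = (PySem.Str.join "\n" l1).toList ++ ('\n'.toString.toList ++ (PySem.Str.join "\n" (b :: u)).toList) := by
      simp only [PySem.Str.toList_join, List.map_append]
      rw [pv_chars_join_append _ _ _ (by simpa using h1) (by simp)]
      simp [List.append_assoc]
    rw [hsplit, List.take_left]

-- length of the join after appending one more piece
theorem pv_len_snoc (l : List String) (x : String) (h : l ≠ []) :
    ((PySem.Str.join "\n" (l ++ [x])).toList.length : Int)
      = ((PySem.Str.join "\n" l).toList.length : Int) + 1 + (PySem.Str.len x) := by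
  rw [pv_join_snoc l x h]
  simp [PySem.Str.len_eq]
  ring_nf

-- the synchronised loop: A's fold over the remaining components equals B's fold over their
-- indented pieces, when e is one past the length of the join of the pieces done so far
theorem pv_loopAB (rest done fr : List String) (full : String) (e : Int)
    (hd : done ≠ [])
    (hfull : full = PySem.Str.join "\n" ((done ++ rest).map pvIndent))
    (he : e = ((PySem.Str.join "\n" (done.map pvIndent)).toList.length : Int) + 1) :
    (rest.foldl pvStepA (done, fr)).2
      = ((rest.map pvIndent).foldl (pvStepB full) (e, fr)).2 := by
  induction rest generalizing done fr e with
  | nil => rfl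
  | cons c rest' ih =>
    simp only [List.map_cons, List.foldl_cons, pvStepA, pvStepB]
    have hlen : e + PySem.Str.len (pvIndent c)
        = ((PySem.Str.join "\n" ((done ++ [c]).map pvIndent)).toList.length : Int) := by
      rw [List.map_append, List.map_cons, List.map_nil,
        pv_len_snoc _ _ (by simpa using hd), he]
    have hframe : "classDiagram\n" ++ PySem.Str.slice full none (some (e + PySem.Str.len (pvIndent c)))
        = "classDiagram" ++ "\n" ++ PySem.Str.join "\n" ((done ++ [c]).map pvIndent) := by
      rw [hlen]
      have hf2 : full = PySem.Str.join "\n" (((done ++ [c]).map pvIndent) ++ rest'.map pvIndent) := by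
        rw [hfull]; simp [List.map_append]
      rw [hf2, pv_slice_join _ _ (by simp),
        show ("classDiagram\n" : String) = "classDiagram" ++ "\n" from rfl]
    rw [hframe]
    exact ih (done ++ [c]) _ _ (by simp) (by rw [hfull]; simp)
      (by rw [← hlen])

-- ===== VERDICT (by name: the statement is the Claim_ definition above) =====
theorem generate_mermaid_frames_spec : Claim_equal_generate_mermaid_frames := by
  intro components _
  unfold Spec_generate_mermaid_frames generate_mermaid_frames generate_mermaid_frames_alt
  cases components with
  | nil => rfl
  | cons c rest =>
    show _ = (((c :: rest).map pvIndent).foldl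
        (pvStepB (PySem.Str.join "\n" ((c :: rest).map pvIndent))) (0, [])).2
    simp only [List.map_cons, List.map_nil, List.foldl_cons, pvStepA, pvStepB, List.nil_append]
    have h1 : (0 : Int) + PySem.Str.len (pvIndent c)
        = ((PySem.Str.join "\n" [pvIndent c]).toList.length : Int) := by
      simp [pv_join_singleton, PySem.Str.len_eq]
    have hframe : "classDiagram\n" ++ PySem.Str.slice
          (PySem.Str.join "\n" (pvIndent c :: rest.map pvIndent)) none
          (some ((0 : Int) + PySem.Str.len (pvIndent c)))
        = "classDiagram" ++ "\n" ++ PySem.Str.join "\n" [pvIndent c] := by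
      rw [h1,
        show pvIndent c :: rest.map pvIndent = [pvIndent c] ++ rest.map pvIndent from rfl,
        pv_slice_join _ _ (by simp),
        show ("classDiagram\n" : String) = "classDiagram" ++ "\n" from rfl]
    rw [hframe, pv_join_singleton]
    exact pv_loopAB rest [c] _ _ _ (by simp) (by simp)
      (by simp only [List.map_cons, List.map_nil]; rw [← h1])
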